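-- pv_equiv track=rewrite | github.com/OliwierKossak/Sudoku-Generator | sudoku generator.py | _evaluate_column
-- ===== SOURCE A (Python) =====
-- def _evaluate_column(board: list[list[int]]):
--     columns_score = 0
--     transpose_list = list(map(list, zip(*board)))
--     for row in transpose_list:
--         start_row_score = 45
--         current_row_score = sum(row)
--         start_row_score -= current_row_score
--         columns_score += abs(start_row_score)
--     return columns_score
-- ===== SOURCE B (Python) =====
-- def _evaluate_column(board: list[list[int]]):
--     rows = [list(r) for r in board]
--     columns_score = 0
--     while rows and all(r for r in rows):
--         column_sum = 0
--         for r in rows: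
--             column_sum += r.pop(0)
--         columns_score += abs(45 - column_sum)
--     return columns_score
-- ===== Notes on version B (the rewrite author's own statement) =====
-- stated objective: alternative
-- what changed: B never builds a transposed copy: it consumes a working copy of the board in a while loop, popping the head off every row to score one column at a time until the shortest row is exhausted, so the shrinking board itself is the maintained state.
import Mathlib
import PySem

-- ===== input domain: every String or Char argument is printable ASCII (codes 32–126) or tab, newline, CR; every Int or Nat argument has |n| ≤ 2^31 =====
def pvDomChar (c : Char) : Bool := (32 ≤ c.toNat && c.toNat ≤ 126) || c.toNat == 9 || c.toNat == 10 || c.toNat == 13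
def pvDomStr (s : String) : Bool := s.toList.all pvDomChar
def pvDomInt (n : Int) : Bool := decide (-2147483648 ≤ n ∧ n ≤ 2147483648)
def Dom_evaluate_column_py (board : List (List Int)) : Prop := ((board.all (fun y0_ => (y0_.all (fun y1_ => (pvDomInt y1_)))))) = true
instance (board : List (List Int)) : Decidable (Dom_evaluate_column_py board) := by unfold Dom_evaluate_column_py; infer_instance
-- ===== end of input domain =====

-- B builds no transposed copy: it consumes a working copy of the board in a while
-- loop, popping the head off every row to score one column at a time until the
-- shortest row is exhausted (objective: alternative).

-- ===== PORT A =====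
-- zip(*board): yields the tuple of heads while every row is nonempty (truncates to the shortest row)
def pyZipStarAux : List Int → List (List Int) → List (List Int)
  | [], _ => []
  | x :: xs, rs =>
    if rs.any (fun t => t.isEmpty) then []
    else (x :: rs.map (fun t => t.headD 0)) :: pyZipStarAux xs (rs.map (fun t => t.tail))

def pyZipStar (board : List (List Int)) : List (List Int) :=
  match board with
  | [] => []
  | r :: rs => pyZipStarAux r rs

def evaluate_column_py (board : List (List Int)) : Int :=
  (pyZipStar board).foldl
    (fun columns_score row =>
      let start_row_score : Int := 45
      let current_row_score : Int := row.sum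
      let start_row_score := start_row_score - current_row_score
      columns_score + |start_row_score|) 0

-- ===== PORT B =====
-- termination measure for the while loop: total number of remaining cells
theorem altGo_measure (rows : List (List Int)) (hne : rows ≠ [])
    (hall : ∀ r ∈ rows, r ≠ []) :
    ((rows.map (fun r => r.tail)).map List.length).sum < (rows.map List.length).sum := by
  induction rows with
  | nil => exact absurd rfl hne
  | cons r rs ih =>
    have hr : r ≠ [] := hall r (List.mem_cons_self ..)
    have h1 : 1 ≤ r.length := List.length_pos_iff.mpr hr
    have ht : r.tail.length = r.length - 1 := List.length_tail
    cases rs with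
    | nil => simp [ht]; omega
    | cons s ss =>
      have := ih (by simp) (fun x hx => hall x (List.mem_cons_of_mem _ hx))
      simp only [List.map_cons, List.sum_cons, ht] at this ⊢
      omega

-- the while loop: `columns_score` is the accumulator; popping the head of every
-- row is rendered functionally (the popped heads are summed, the rows become
-- their tails)
def altGo (rows : List (List Int)) (columns_score : Int) : Int :=
  if h : rows.isEmpty || rows.any (fun r => r.isEmpty) then columns_score
  else
    altGo (rows.map (fun r => r.tail))
      (columns_score + |(45 : Int) - (rows.map (fun r => r.headD 0)).sum|)
termination_by (rows.map List.length).sum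
decreasing_by
  have h1 : rows ≠ [] := fun he => h (by simp [he])
  have h2 : ∀ r ∈ rows, r ≠ [] := fun r hr he => h (by
    simp only [Bool.or_eq_true, List.any_eq_true]
    exact Or.inr ⟨r, hr, by simp [he]⟩)
  simpa using altGo_measure rows h1 h2

def evaluate_column_py_alt (board : List (List Int)) : Int :=
  altGo board 0

-- ===== PRECONDITION & SPEC =====
def Spec_evaluate_column_py (board : List (List Int)) (out : Int) : Prop := out = evaluate_column_py_alt board
instance (board : List (List Int)) (out : Int) : Decidable (Spec_evaluate_column_py board out) := by unfold Spec_evaluate_column_py; infer_instance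

-- ===== CLAIM (what is proved, stated in full; the proofs are below) =====
def Claim_equal_evaluate_column_py : Prop := ∀ (board : List (List Int)), Dom_evaluate_column_py board → Spec_evaluate_column_py board (evaluate_column_py board)

-- ===== LEMMAS AND PROOFS =====

-- folding A's scoring over the transpose-of-the-rest equals B's consuming loop
theorem fold_zip_eq_altGo (r : List Int) : ∀ (rs : List (List Int)) (total : Int),
    (pyZipStarAux r rs).foldl
        (fun s row => s + |(45 : Int) - row.sum|) total
      = altGo (r :: rs) total := by
  induction r with
  | nil =>
    intro rs total
    rw [altGo.eq_def]
    simp [pyZipStarAux]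
  | cons x xs ih =>
    intro rs total
    by_cases hemp : (rs.any (fun t => t.isEmpty)) = true
    · rw [pyZipStarAux, if_pos hemp, altGo.eq_def]
      simp [hemp]
    · rw [pyZipStarAux, if_neg hemp, altGo.eq_def]
      have hcond : (((x :: xs) :: rs).isEmpty
          || ((x :: xs) :: rs).any (fun r => r.isEmpty)) = false := by
        simp [hemp]
      rw [dif_neg (fun hc => absurd (hcond ▸ hc) Bool.false_ne_true)]
      simp only [List.foldl_cons, List.map_cons, List.headD_cons, List.tail_cons,
        List.sum_cons]
      exact ih (rs.map (fun t => t.tail)) _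

theorem evaluate_column_py_spec : Claim_equal_evaluate_column_py := by
  intro board _
  unfold Spec_evaluate_column_py evaluate_column_py evaluate_column_py_alt
  cases board with
  | nil => rw [altGo.eq_def]; rfl
  | cons r rs => exact fold_zip_eq_altGo r rs 0
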